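-- pv_equiv track=rewrite | github.com/ol-ilyassov/jusan-hw2 | python/сложные задачи/perfectly-balanced.py | perfectly_balanced
-- ===== SOURCE A (Python) =====
-- def perfectly_balanced(nums:list[int]) -> bool:
--     for i in range(1, len(nums)-1):
--         left = 0
--         right = 0
--
--         for l in range(i):
--             left += nums[l]
--
--         for r in range(i + 1, len(nums)):
--             right += nums[r]
--
--         if left == right:
--             return True
--
--     return False
-- ===== SOURCE B (Python) =====
-- def perfectly_balanced(nums: list[int]) -> bool:
--     # single pass: running left sum against total (O(n) instead of A's O(n^2))
--     if len(nums) < 3: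
--         return False
--     total = sum(nums)
--     left = nums[0]
--     for x in nums[1:-1]:
--         if 2 * left + x == total:
--             return True
--         left += x
--     return False
-- ===== Notes on version B (the rewrite author's own statement) =====
-- stated objective: faster
-- what changed: replaces the per-pivot recomputation of both side sums (two inner loops per pivot) by one precomputed total and a single pass maintaining a running left sum
import Mathlib
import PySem

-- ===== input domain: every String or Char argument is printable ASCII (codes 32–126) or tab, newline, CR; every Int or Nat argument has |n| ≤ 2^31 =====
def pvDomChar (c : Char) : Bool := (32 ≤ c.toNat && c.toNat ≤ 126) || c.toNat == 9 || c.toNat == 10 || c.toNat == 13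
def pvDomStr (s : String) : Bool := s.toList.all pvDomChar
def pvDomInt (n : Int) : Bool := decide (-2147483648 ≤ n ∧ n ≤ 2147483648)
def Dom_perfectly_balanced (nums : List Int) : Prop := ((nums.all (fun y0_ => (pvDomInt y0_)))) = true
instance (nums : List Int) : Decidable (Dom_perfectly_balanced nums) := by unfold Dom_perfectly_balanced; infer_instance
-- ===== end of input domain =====

-- B replaces A's per-pivot recomputation of both side sums by a precomputed total and one
-- running left sum (single pass); equal return values are proved on all inputs.

-- ===== PORT A =====
-- indices produced by the ranges are always in bounds, so pyGetD's default is never used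
def perfectly_balanced (nums : List Int) : Bool :=
  (PySem.List.pyRange 1 ((nums.length : Int) - 1) 1).any (fun i =>
    let left := (PySem.List.pyRange 0 i 1).foldl
      (fun acc l => acc + PySem.List.pyGetD nums l 0) 0
    let right := (PySem.List.pyRange (i + 1) (nums.length : Int) 1).foldl
      (fun acc r => acc + PySem.List.pyGetD nums r 0) 0
    left == right)

-- ===== PORT B =====
def pbGo (total : Int) (left : Int) : List Int → Bool
  | [] => false
  | x :: rest => if 2 * left + x == total then true else pbGo total (left + x) rest

def perfectly_balanced_alt (nums : List Int) : Bool :=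
  if nums.length < 3 then false
  else pbGo nums.sum (PySem.List.pyGetD nums 0 0)
        (PySem.List.slice nums (some 1) (some (-1)))

-- ===== PRECONDITION & SPEC =====
def Spec_perfectly_balanced (nums : List Int) (out : Bool) : Prop := out = perfectly_balanced_alt nums
instance (nums : List Int) (out : Bool) : Decidable (Spec_perfectly_balanced nums out) := by unfold Spec_perfectly_balanced; infer_instance

-- ===== CLAIM (what is proved, stated in full; the proofs are below) =====
def Claim_equal_perfectly_balanced : Prop := ∀ (nums : List Int), Dom_perfectly_balanced nums → Spec_perfectly_balanced nums (perfectly_balanced nums)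

-- ===== LEMMAS AND PROOFS =====

-- prefix of an index loop is a take
lemma map_getD_range_eq_take (nums : List Int) (m : Nat) (hm : m ≤ nums.length) :
    (List.range m).map (fun k => nums.getD k 0) = nums.take m := by
  induction m with
  | zero => simp
  | succ m ih =>
    have hlt : m < nums.length := by omega
    rw [List.range_succ, List.map_append, ih (by omega), List.take_add_one]
    simp [List.getD, List.getElem?_eq_getElem hlt]

-- A's inner left loop is a prefix sum
lemma A_left (nums : List Int) (m : Nat) (hm : m ≤ nums.length) :
    (PySem.List.pyRange 0 (m : Int) 1).foldl
      (fun acc l => acc + PySem.List.pyGetD nums l 0) 0 = (nums.take m).sum := by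
  rw [PySem.List.foldl_add, PySem.List.pyRange_zero_nat, List.map_map]
  simp only [Function.comp_def, PySem.List.pyGetD_natCast]
  rw [map_getD_range_eq_take nums m hm]
  simp

-- A's inner right loop is a suffix sum
lemma A_right (nums : List Int) (m : Nat) :
    (PySem.List.pyRange ((m : Int) + 1) (nums.length : Int) 1).foldl
      (fun acc r => acc + PySem.List.pyGetD nums r 0) 0 = (nums.drop (m + 1)).sum := by
  have h := PySem.List.foldl_pyRange_pyGetD nums 0 (fun acc x => acc + x) 0
    (a := (m : Int) + 1) (by positivity)
  simp only [PySem.List.len] at h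
  rw [h]
  rw [PySem.List.foldl_add]
  simp

-- A as an existence of a balanced pivot index
lemma A_iff (nums : List Int) :
    perfectly_balanced nums = true ↔
      ∃ j : Nat, j + 2 < nums.length ∧
        (nums.take (j + 1)).sum = (nums.drop (j + 2)).sum := by
  unfold perfectly_balanced
  rw [PySem.List.pyRange_one, List.any_map, List.any_eq_true]
  have hcast : ∀ j : Nat, (1 : Int) + (j : Int) = ((j + 1 : Nat) : Int) := by
    intro j; push_cast; ring
  constructor
  · rintro ⟨j, hj, hf⟩
    rw [List.mem_range] at hj
    have hj' : j + 2 < nums.length := by omega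
    refine ⟨j, hj', ?_⟩
    simp only [Function.comp_apply, hcast j] at hf
    rw [A_left nums (j + 1) (by omega)] at hf
    have : ((j + 1 : Nat) : Int) + 1 = ((j + 1 : Nat) : Int) + 1 := rfl
    rw [A_right nums (j + 1)] at hf
    simpa using hf
  · rintro ⟨j, hj, hsum⟩
    refine ⟨j, List.mem_range.mpr (by omega), ?_⟩
    simp only [Function.comp_apply, hcast j]
    rw [A_left nums (j + 1) (by omega), A_right nums (j + 1)]
    simpa using hsum

-- B's loop as an existence over the scanned list
lemma pbGo_iff (total : Int) (l : List Int) (left : Int) :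
    pbGo total left l = true ↔
      ∃ j : Nat, ∃ h : j < l.length,
        2 * (left + (l.take j).sum) + l[j] = total := by
  induction l generalizing left with
  | nil => simp [pbGo]
  | cons x rest ih =>
    by_cases h : 2 * left + x = total
    · constructor
      · intro _
        exact ⟨0, by simp, by simpa using h⟩
      · intro _
        simp [pbGo, h]
    · have hstep : pbGo total left (x :: rest) = pbGo total (left + x) rest := by
        simp [pbGo, h]
      rw [hstep, ih]
      constructor
      · rintro ⟨j, hj, hv⟩
        refine ⟨j + 1, by simpa using Nat.succ_lt_succ hj, ?_⟩
        simp only [List.take_succ_cons, List.sum_cons, List.getElem_cons_succ]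
        omega
      · rintro ⟨j, hj, hv⟩
        cases j with
        | zero => simp at hv; omega
        | succ j =>
          refine ⟨j, by simpa using Nat.lt_of_succ_lt_succ hj, ?_⟩
          simp only [List.take_succ_cons, List.sum_cons, List.getElem_cons_succ] at hv
          omega

-- the total splits at the pivot
lemma sum_split (nums : List Int) (j : Nat) (hj : j + 1 < nums.length) :
    nums.sum = (nums.take (j + 1)).sum + nums[j + 1] + (nums.drop (j + 2)).sum := by
  conv_lhs => rw [← List.take_append_drop (j + 1) nums]
  rw [List.sum_append, List.drop_eq_getElem_cons hj, List.sum_cons]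
  ring

-- B as the same existence, for lists of length ≥ 3
lemma alt_iff (nums : List Int) (hn : 3 ≤ nums.length) :
    perfectly_balanced_alt nums = true ↔
      ∃ j : Nat, j + 2 < nums.length ∧
        (nums.take (j + 1)).sum = (nums.drop (j + 2)).sum := by
  obtain ⟨a, t, rfl⟩ : ∃ a t, nums = a :: t := by
    cases nums with
    | nil => simp at hn
    | cons a t => exact ⟨a, t, rfl⟩
  have ht : 2 ≤ t.length := by simpa using hn
  unfold perfectly_balanced_alt
  rw [if_neg (by omega)]
  have hslice : PySem.List.slice (a :: t) (some 1) (some (-1)) = t.dropLast := by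
    show List.take (PySem.List.clampIdx (a :: t).length (-1) -
        PySem.List.clampIdx (a :: t).length 1)
      (List.drop (PySem.List.clampIdx (a :: t).length 1) (a :: t)) = t.dropLast
    rw [PySem.List.clampIdx_neg_one]
    have h1 : PySem.List.clampIdx (a :: t).length 1 = 1 := by
      simp [PySem.List.clampIdx]
    rw [h1, List.dropLast_eq_take]
    simp only [List.length_cons, List.drop_one, List.tail_cons]
    congr 1
  rw [hslice, pbGo_iff]
  have hgetA : PySem.List.pyGetD (a :: t) 0 0 = a := PySem.List.pyGetD_zero_cons a t 0
  constructor
  · rintro ⟨j, hj, hv⟩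
    have hjl : j < t.length - 1 := by simpa [List.length_dropLast] using hj
    refine ⟨j, by simp; omega, ?_⟩
    have htake : t.dropLast.take j = t.take j := by
      rw [List.dropLast_eq_take, List.take_take]; congr 1; omega
    have hget : t.dropLast[j] = t[j]'(by omega) := List.getElem_dropLast _
    rw [hgetA, htake, hget] at hv
    have hsplit := sum_split (a :: t) j (by simp; omega)
    have htk : ((a :: t).take (j + 1)).sum = a + (t.take j).sum := by
      simp [List.take_succ_cons]
    have hgt : (a :: t)[j + 1]'(by simp; omega) = t[j]'(by omega) := by simp
    rw [htk, hgt] at hsplit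
    rw [htk]
    omega
  · rintro ⟨j, hjlen, hsum⟩
    have hjl : j < t.length - 1 := by simp at hjlen; omega
    refine ⟨j, by simpa [List.length_dropLast] using hjl, ?_⟩
    have htake : t.dropLast.take j = t.take j := by
      rw [List.dropLast_eq_take, List.take_take]; congr 1; omega
    have hget : t.dropLast[j]'(by simpa [List.length_dropLast] using hjl) = t[j]'(by omega) :=
      List.getElem_dropLast _
    rw [hgetA, htake, hget]
    have hsplit := sum_split (a :: t) j (by simp; omega)
    have htk : ((a :: t).take (j + 1)).sum = a + (t.take j).sum := by
      simp [List.take_succ_cons]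
    have hgt : (a :: t)[j + 1]'(by simp; omega) = t[j]'(by omega) := by simp
    rw [htk, hgt] at hsplit
    rw [htk] at hsum
    omega

-- ===== VERDICT (by name: the statement is the Claim_ definition above) =====
theorem perfectly_balanced_spec : Claim_equal_perfectly_balanced := by
  intro nums _
  unfold Spec_perfectly_balanced
  by_cases hn : nums.length < 3
  · have hA : PySem.List.pyRange 1 ((nums.length : Int) - 1) 1 = [] := by
      rw [PySem.List.pyRange_one]
      have h0 : ((nums.length : Int) - 1 - 1).toNat = 0 := by omega
      simp [h0]
    unfold perfectly_balanced perfectly_balanced_alt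
    simp [hA, hn]
  · simp only [not_lt] at hn
    rw [Bool.eq_iff_iff, A_iff, alt_iff nums hn]
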